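-- pv_equiv track=rewrite | github.com/komalrubyjane/cinemaX | ai_engine/update_dataset.py | assign_mood
-- ===== SOURCE A (Python) =====
-- def assign_mood(genre_str):
--     genres = str(genre_str).split('|')
--
--     # Mapping genres to moods
--     if any(g in genres for g in ["Comedy", "Animation", "Family"]):
--         return "Happy", "Relax"
--     elif any(g in genres for g in ["Drama", "Romance"]):
--         return "Romantic", "Sad"
--     elif any(g in genres for g in ["Action", "Thriller", "Horror", "Crime"]):
--         return "Thrill", "Scary"
--     elif any(g in genres for g in ["Documentary", "Mystery"]):
--         return "Bored", "Relax"  # Cures boredom or relaxes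
--     else:
--         return "Relax", "Happy"
-- ===== SOURCE B (Python) =====
-- _RANK = {
--     "Comedy": 0, "Animation": 0, "Family": 0,
--     "Drama": 1, "Romance": 1,
--     "Action": 2, "Thriller": 2, "Horror": 2, "Crime": 2,
--     "Documentary": 3, "Mystery": 3,
-- }
--
-- _MOODS = [("Happy", "Relax"), ("Romantic", "Sad"), ("Thrill", "Scary"), ("Bored", "Relax")]
--
--
-- def assign_mood(genre_str):
--     best = None
--     for g in str(genre_str).split('|'):
--         r = _RANK.get(g)
--         if r is not None and (best is None or r < best):
--             best = r
--     return _MOODS[best] if best is not None else ("Relax", "Happy")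
-- ===== Notes on version B (the rewrite author's own statement) =====
-- stated objective: simpler
-- what changed: Replaces the four sequential any()-membership scans over the genre list with a rank table and a single pass over the split genres that keeps the smallest rank seen, then indexes the mood pair.
import Mathlib
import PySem

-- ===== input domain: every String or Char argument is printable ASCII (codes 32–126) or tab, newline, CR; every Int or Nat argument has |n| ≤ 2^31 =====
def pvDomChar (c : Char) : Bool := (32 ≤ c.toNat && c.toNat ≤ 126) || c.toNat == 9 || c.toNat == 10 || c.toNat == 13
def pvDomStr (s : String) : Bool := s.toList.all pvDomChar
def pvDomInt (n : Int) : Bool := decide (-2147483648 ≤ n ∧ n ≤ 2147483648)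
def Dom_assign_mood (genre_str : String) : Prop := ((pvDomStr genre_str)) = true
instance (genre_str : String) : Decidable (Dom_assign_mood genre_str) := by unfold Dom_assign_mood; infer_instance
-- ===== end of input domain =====

-- B replaces A's four sequential any()-membership scans with a rank table and one pass over the split genres keeping the minimum rank (objective: simpler).


-- ===== PORT A =====
def assign_mood (genre_str : String) : String × String :=
  let genres := (PySem.Str.split? genre_str "|").getD []
  if (["Comedy", "Animation", "Family"].any fun g => genres.contains g) then
    ("Happy", "Relax")
  else if (["Drama", "Romance"].any fun g => genres.contains g) then
    ("Romantic", "Sad")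
  else if (["Action", "Thriller", "Horror", "Crime"].any fun g => genres.contains g) then
    ("Thrill", "Scary")
  else if (["Documentary", "Mystery"].any fun g => genres.contains g) then
    ("Bored", "Relax")
  else
    ("Relax", "Happy")

-- ===== PORT B =====
-- _RANK.get(g): the rank table as a lookup function
def pvRankOf (g : String) : Option Nat :=
  if g = "Comedy" ∨ g = "Animation" ∨ g = "Family" then some 0
  else if g = "Drama" ∨ g = "Romance" then some 1
  else if g = "Action" ∨ g = "Thriller" ∨ g = "Horror" ∨ g = "Crime" then some 2
  else if g = "Documentary" ∨ g = "Mystery" then some 3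
  else none

-- _MOODS[r]
def pvMoodOf (r : Nat) : String × String :=
  match r with
  | 0 => ("Happy", "Relax")
  | 1 => ("Romantic", "Sad")
  | 2 => ("Thrill", "Scary")
  | _ => ("Bored", "Relax")

-- loop body: keep the smaller rank (None = no match yet)
def pvStep (best : Option Nat) (g : String) : Option Nat :=
  match pvRankOf g with
  | none => best
  | some r =>
    match best with
    | none => some r
    | some b => if r < b then some r else some b

def assign_mood_alt (genre_str : String) : String × String :=
  match ((PySem.Str.split? genre_str "|").getD []).foldl pvStep none with
  | some r => pvMoodOf r
  | none => ("Relax", "Happy")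

-- ===== PRECONDITION & SPEC =====
def Spec_assign_mood (genre_str : String) (out : String × String) : Prop := out = assign_mood_alt genre_str
instance (genre_str : String) (out : String × String) : Decidable (Spec_assign_mood genre_str out) := by unfold Spec_assign_mood; infer_instance

-- ===== CLAIM (what is proved, stated in full; the proofs are below) =====
def Claim_equal_assign_mood : Prop := ∀ (genre_str : String), Dom_assign_mood genre_str → Spec_assign_mood genre_str (assign_mood genre_str)

-- ===== LEMMAS AND PROOFS =====

def pvOmin : Option Nat → Option Nat → Option Nat
  | none, b => b
  | some a, none => some a
  | some a, some b => some (min a b)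

lemma pvStep_eq_omin (best : Option Nat) (g : String) :
    pvStep best g = pvOmin best (pvRankOf g) := by
  cases h : pvRankOf g <;> cases best <;>
    simp [pvStep, pvOmin, h, min_def] <;> split_ifs <;> first | rfl | omega

lemma pvOmin_assoc (a b c : Option Nat) :
    pvOmin (pvOmin a b) c = pvOmin a (pvOmin b c) := by
  cases a <;> cases b <;> cases c <;> simp [pvOmin, min_assoc]

lemma pvFold_acc (l : List String) (acc : Option Nat) :
    l.foldl pvStep acc = pvOmin acc (l.foldl pvStep none) := by
  induction l generalizing acc with
  | nil => cases acc <;> rfl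
  | cons g l ih =>
    simp only [List.foldl_cons, pvStep_eq_omin]
    rw [ih (pvOmin acc (pvRankOf g)), ih (pvOmin none (pvRankOf g)), pvOmin_assoc]
    rfl

-- membership of the four groups, as propositions
abbrev pvC0 (l : List String) : Prop := "Comedy" ∈ l ∨ "Animation" ∈ l ∨ "Family" ∈ l
abbrev pvC1 (l : List String) : Prop := "Drama" ∈ l ∨ "Romance" ∈ l
abbrev pvC2 (l : List String) : Prop := "Action" ∈ l ∨ "Thriller" ∈ l ∨ "Horror" ∈ l ∨ "Crime" ∈ l
abbrev pvC3 (l : List String) : Prop := "Documentary" ∈ l ∨ "Mystery" ∈ l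

def pvFormula (l : List String) : Option Nat :=
  if pvC0 l then some 0 else if pvC1 l then some 1
  else if pvC2 l then some 2 else if pvC3 l then some 3 else none

lemma pvFold_char (l : List String) : l.foldl pvStep none = pvFormula l := by
  induction l with
  | nil => simp [pvFormula, pvC0, pvC1, pvC2, pvC3]
  | cons g l ih =>
    rw [List.foldl_cons, pvStep_eq_omin, pvFold_acc, ih]
    show pvOmin (pvOmin none (pvRankOf g)) (pvFormula l) = pvFormula (g :: l)
    unfold pvRankOf
    split_ifs with hA hB hC hD
    · rcases hA with h|h|h <;> subst h <;>
        simp only [pvFormula, pvC0, pvC1, pvC2, pvC3, List.mem_cons] <;>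
        simp <;> split_ifs <;> simp_all [pvOmin]
    · rcases hB with h|h <;> subst h <;>
        simp only [pvFormula, pvC0, pvC1, pvC2, pvC3, List.mem_cons] <;>
        simp <;> split_ifs <;> simp_all [pvOmin]
    · rcases hC with h|h|h|h <;> subst h <;>
        simp only [pvFormula, pvC0, pvC1, pvC2, pvC3, List.mem_cons] <;>
        simp <;> split_ifs <;> simp_all [pvOmin]
    · rcases hD with h|h <;> subst h <;>
        simp only [pvFormula, pvC0, pvC1, pvC2, pvC3, List.mem_cons] <;>
        simp <;> split_ifs <;> simp_all [pvOmin]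
    · simp_all [pvFormula, pvC0, pvC1, pvC2, pvC3, List.mem_cons, eq_comm, pvOmin]

-- ===== VERDICT (by name: the statement is the Claim_ definition above) =====
theorem assign_mood_spec : Claim_equal_assign_mood := by
  intro s _
  unfold Spec_assign_mood assign_mood assign_mood_alt
  rw [pvFold_char]
  unfold pvFormula pvC0 pvC1 pvC2 pvC3
  simp only [List.any_cons, List.any_nil, Bool.or_false, List.contains_eq_mem,
    Bool.or_eq_true, decide_eq_true_eq]
  split_ifs <;> simp_all [pvMoodOf]
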